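-- pv_equiv track=rewrite | github.com/toandnh/foobar.withgoogle | foobar.withgoogle/Bring a Gun to a Trainer Fight/solution.py | get_reflections
-- ===== SOURCE A (Python) =====
-- def get_reflections(dimensions, position_1, position_2, distance):
--     positions = []
--
--     x_range = int((position_1[0] + distance) / dimensions[0]) + 1
--     y_range = int((position_1[1] + distance) / dimensions[1]) + 1
--
--     y_temp = position_2[1]
--     for i in range(y_range):
--         x_temp = position_2[0]
--         if (i != 0):
--             if (i % 2 == 0):
--                 y_temp += 2 * position_2[1]
--             else:
--                 y_temp += 2 * (dimensions[1] - position_2[1])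
--         for j in range(x_range):
--             positions.append((x_temp, y_temp))
--             positions.append((x_temp, -y_temp))
--             positions.append((-x_temp, -y_temp))
--             positions.append((-x_temp, y_temp))
--             if (j % 2 == 0):
--                 x_temp += 2 * (dimensions[0] - position_2[0])
--             else:
--                 x_temp += 2 * position_2[0]
--
--     return positions
-- ===== SOURCE B (Python) =====
-- def get_reflections(dimensions, position_1, position_2, distance):
--     x_range = int((position_1[0] + distance) / dimensions[0]) + 1
--     y_range = int((position_1[1] + distance) / dimensions[1]) + 1
--
--     def coord(k, dim, pos):
--         # closed-form mirror coordinate for the k-th reflection along one axis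
--         return k * dim + pos if k % 2 == 0 else (k + 1) * dim - pos
--
--     return [pt
--             for i in range(y_range)
--             for j in range(x_range)
--             for pt in ((lambda x, y: [(x, y), (x, -y), (-x, -y), (-x, y)])(
--                 coord(j, dimensions[0], position_2[0]),
--                 coord(i, dimensions[1], position_2[1])))]
-- ===== Notes on version B (the rewrite author's own statement) =====
-- stated objective: simpler
-- what changed: Replaces the two threaded running accumulators (x_temp/y_temp updated by parity-dependent increments) with a direct closed-form coordinate per index and builds the result as one flat comprehension instead of appending inside nested stateful loops.
import Mathlib
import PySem

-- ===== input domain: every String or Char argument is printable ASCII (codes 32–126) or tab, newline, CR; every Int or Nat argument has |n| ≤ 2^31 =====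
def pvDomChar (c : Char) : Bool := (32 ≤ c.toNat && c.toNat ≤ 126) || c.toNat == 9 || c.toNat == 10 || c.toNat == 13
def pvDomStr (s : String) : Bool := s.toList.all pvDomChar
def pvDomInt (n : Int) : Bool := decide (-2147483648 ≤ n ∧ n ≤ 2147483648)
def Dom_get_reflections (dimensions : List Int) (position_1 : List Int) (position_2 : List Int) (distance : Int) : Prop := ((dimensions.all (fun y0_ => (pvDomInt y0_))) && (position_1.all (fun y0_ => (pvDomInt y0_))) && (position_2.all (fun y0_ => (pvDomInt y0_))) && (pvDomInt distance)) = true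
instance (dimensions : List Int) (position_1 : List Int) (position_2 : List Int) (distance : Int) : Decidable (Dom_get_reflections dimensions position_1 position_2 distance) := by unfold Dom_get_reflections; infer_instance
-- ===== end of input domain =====

-- B replaces A's two parity-updated running accumulators with a closed-form coordinate per
-- index and builds the output as one flat comprehension (simpler decomposition, same cost).

-- ===== PORT A =====
def get_reflections (dimensions : List Int) (position_1 : List Int) (position_2 : List Int) (distance : Int) : List (Int × Int) :=
  let x_range := PySem.Int.truncdiv (PySem.List.pyGetD position_1 0 0 + distance) (PySem.List.pyGetD dimensions 0 0) + 1
  let y_range := PySem.Int.truncdiv (PySem.List.pyGetD position_1 1 0 + distance) (PySem.List.pyGetD dimensions 1 0) + 1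
  ((PySem.List.pyRange 0 y_range 1).foldl
    (fun (st : Int × List (Int × Int)) (i : Int) =>
      let y_temp : Int :=
        if i ≠ 0 then
          if PySem.Int.mod i 2 = 0 then st.1 + 2 * PySem.List.pyGetD position_2 1 0
          else st.1 + 2 * (PySem.List.pyGetD dimensions 1 0 - PySem.List.pyGetD position_2 1 0)
        else st.1
      (y_temp,
        ((PySem.List.pyRange 0 x_range 1).foldl
          (fun (st2 : Int × List (Int × Int)) (j : Int) =>
            if PySem.Int.mod j 2 = 0 then
              (st2.1 + 2 * (PySem.List.pyGetD dimensions 0 0 - PySem.List.pyGetD position_2 0 0),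
               st2.2 ++ [(st2.1, y_temp), (st2.1, -y_temp), (-st2.1, -y_temp), (-st2.1, y_temp)])
            else
              (st2.1 + 2 * PySem.List.pyGetD position_2 0 0,
               st2.2 ++ [(st2.1, y_temp), (st2.1, -y_temp), (-st2.1, -y_temp), (-st2.1, y_temp)]))
          (PySem.List.pyGetD position_2 0 0, st.2)).2))
    (PySem.List.pyGetD position_2 1 0, ([] : List (Int × Int)))).2

-- ===== PORT B =====
-- closed-form mirror coordinate for the k-th reflection along one axis (B's helper `coord`)
def pvCoord (k dim pos : Int) : Int :=
  if PySem.Int.mod k 2 = 0 then k * dim + pos else (k + 1) * dim - pos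

def get_reflections_alt (dimensions : List Int) (position_1 : List Int) (position_2 : List Int) (distance : Int) : List (Int × Int) :=
  let x_range := PySem.Int.truncdiv (PySem.List.pyGetD position_1 0 0 + distance) (PySem.List.pyGetD dimensions 0 0) + 1
  let y_range := PySem.Int.truncdiv (PySem.List.pyGetD position_1 1 0 + distance) (PySem.List.pyGetD dimensions 1 0) + 1
  (PySem.List.pyRange 0 y_range 1).flatMap (fun i =>
    (PySem.List.pyRange 0 x_range 1).flatMap (fun j =>
      let x := pvCoord j (PySem.List.pyGetD dimensions 0 0) (PySem.List.pyGetD position_2 0 0)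
      let y := pvCoord i (PySem.List.pyGetD dimensions 1 0) (PySem.List.pyGetD position_2 1 0)
      [(x, y), (x, -y), (-x, -y), (-x, y)]))

-- ===== PRECONDITION & SPEC =====
-- Pre_ = exactly the inputs where Python A returns: all three lists need indices 0 and 1
-- (else IndexError) and both dimensions must be nonzero (else ZeroDivisionError).
def Pre_get_reflections (dimensions : List Int) (position_1 : List Int) (position_2 : List Int) (distance : Int) : Prop :=
  2 ≤ dimensions.length ∧ 2 ≤ position_1.length ∧ 2 ≤ position_2.length ∧
  dimensions.getD 0 0 ≠ 0 ∧ dimensions.getD 1 0 ≠ 0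

instance (dimensions : List Int) (position_1 : List Int) (position_2 : List Int) (distance : Int) : Decidable (Pre_get_reflections dimensions position_1 position_2 distance) := by
  unfold Pre_get_reflections; infer_instance

def pvWitness_get_reflections : List Int × List Int × List Int × Int := ([3, 4], [5, 6], [1, 2], 10)

def Spec_get_reflections (dimensions : List Int) (position_1 : List Int) (position_2 : List Int) (distance : Int) (out : List (Int × Int)) : Prop := out = get_reflections_alt dimensions position_1 position_2 distance
instance (dimensions : List Int) (position_1 : List Int) (position_2 : List Int) (distance : Int) (out : List (Int × Int)) : Decidable (Spec_get_reflections dimensions position_1 position_2 distance out) := by unfold Spec_get_reflections; infer_instance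

-- ===== CLAIM (what is proved, stated in full; the proofs are below) =====
def Claim_equal_get_reflections : Prop := ∀ (dimensions : List Int) (position_1 : List Int) (position_2 : List Int) (distance : Int), Dom_get_reflections dimensions position_1 position_2 distance → Pre_get_reflections dimensions position_1 position_2 distance → Spec_get_reflections dimensions position_1 position_2 distance (get_reflections dimensions position_1 position_2 distance)


-- ===== LEMMAS AND PROOFS =====

lemma pvCoord_zero (d p : Int) : pvCoord 0 d p = p := by
  simp [pvCoord, PySem.Int.mod]

lemma pvMod_two_natCast (n : Nat) : PySem.Int.mod (n : Int) 2 = ((n % 2 : Nat) : Int) := by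
  rw [PySem.Int.mod_eq_emod_of_pos (by norm_num)]
  omega

lemma pvCoord_succ (n : Nat) (d p : Int) :
    pvCoord ((n : Int) + 1) d p =
      (if PySem.Int.mod (n : Int) 2 = 0 then pvCoord (n : Int) d p + 2 * (d - p)
       else pvCoord (n : Int) d p + 2 * p) := by
  unfold pvCoord
  rw [pvMod_two_natCast]
  have h : ((n : Int) + 1) = ((n + 1 : Nat) : Int) := by push_cast; ring
  rw [h, pvMod_two_natCast]
  rcases Nat.even_or_odd n with he | ho
  · have h0 : n % 2 = 0 := Nat.even_iff.mp he
    have h1 : (n + 1) % 2 = 1 := by omega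
    simp [h0, h1]
    ring
  · have h0 : n % 2 = 1 := Nat.odd_iff.mp ho
    have h1 : (n + 1) % 2 = 0 := by omega
    simp [h0, h1]
    ring

-- the inner (x) loop: A's parity-updated accumulator equals B's closed-form coordinate
lemma pv_inner_loop (d0 p0 y_temp : Int) (n : Nat) (acc : List (Int × Int)) :
    (PySem.List.pyRange 0 (n : Int) 1).foldl
      (fun (st2 : Int × List (Int × Int)) (j : Int) =>
        if PySem.Int.mod j 2 = 0 then
          (st2.1 + 2 * (d0 - p0),
           st2.2 ++ [(st2.1, y_temp), (st2.1, -y_temp), (-st2.1, -y_temp), (-st2.1, y_temp)])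
        else
          (st2.1 + 2 * p0,
           st2.2 ++ [(st2.1, y_temp), (st2.1, -y_temp), (-st2.1, -y_temp), (-st2.1, y_temp)]))
      (p0, acc)
    = (pvCoord (n : Int) d0 p0,
       acc ++ (PySem.List.pyRange 0 (n : Int) 1).flatMap
         (fun j => [(pvCoord j d0 p0, y_temp), (pvCoord j d0 p0, -y_temp),
                    (-pvCoord j d0 p0, -y_temp), (-pvCoord j d0 p0, y_temp)])) := by
  induction n generalizing acc with
  | zero => simp [PySem.List.pyRange_one_eq_nil, pvCoord_zero]
  | succ m ih =>
    have hcast : ((m + 1 : Nat) : Int) = (m : Int) + 1 := by push_cast; ring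
    rw [hcast, PySem.List.pyRange_one_succ_right (by positivity), List.foldl_append,
      List.flatMap_append, ih, pvCoord_succ]
    simp only [List.foldl_cons, List.foldl_nil]
    by_cases hm : PySem.Int.mod (m : Int) 2 = 0
    · rw [if_pos hm, if_pos hm]; simp [List.append_assoc]
    · rw [if_neg hm, if_neg hm]; simp [List.append_assoc]

-- same statement for an arbitrary Int bound, projected to the accumulated list
lemma pv_inner_loop_int (d0 p0 y_temp xr : Int) (acc : List (Int × Int)) :
    ((PySem.List.pyRange 0 xr 1).foldl
      (fun (st2 : Int × List (Int × Int)) (j : Int) =>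
        if PySem.Int.mod j 2 = 0 then
          (st2.1 + 2 * (d0 - p0),
           st2.2 ++ [(st2.1, y_temp), (st2.1, -y_temp), (-st2.1, -y_temp), (-st2.1, y_temp)])
        else
          (st2.1 + 2 * p0,
           st2.2 ++ [(st2.1, y_temp), (st2.1, -y_temp), (-st2.1, -y_temp), (-st2.1, y_temp)]))
      (p0, acc)).2
    = acc ++ (PySem.List.pyRange 0 xr 1).flatMap
        (fun j => [(pvCoord j d0 p0, y_temp), (pvCoord j d0 p0, -y_temp),
                   (-pvCoord j d0 p0, -y_temp), (-pvCoord j d0 p0, y_temp)]) := by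
  rcases le_or_gt xr 0 with hm | hm
  · simp [PySem.List.pyRange_one_eq_nil hm]
  · have h : xr = ((xr.toNat : Nat) : Int) := by omega
    rw [h, pv_inner_loop]

-- value of A's y accumulator after the first n outer iterations
def pvYprev (d1 p1v : Int) (n : Nat) : Int :=
  if n = 0 then p1v else pvCoord ((n : Int) - 1) d1 p1v

lemma pv_ytemp (d1 p1v : Int) (n : Nat) :
    (if (n : Int) ≠ 0 then
       if PySem.Int.mod (n : Int) 2 = 0 then pvYprev d1 p1v n + 2 * p1v
       else pvYprev d1 p1v n + 2 * (d1 - p1v)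
     else pvYprev d1 p1v n) = pvCoord (n : Int) d1 p1v := by
  cases n with
  | zero => simp [pvYprev, pvCoord_zero]
  | succ m =>
    have hne : ((m + 1 : Nat) : Int) ≠ 0 := by positivity
    have hprev : pvYprev d1 p1v (m + 1) = pvCoord (m : Int) d1 p1v := by
      simp [pvYprev]
    have hcast : ((m + 1 : Nat) : Int) = (m : Int) + 1 := by push_cast; ring
    rw [if_pos hne, hprev, hcast, pvCoord_succ, pvMod_two_natCast, ← hcast,
      pvMod_two_natCast]
    rcases Nat.even_or_odd m with he | ho
    · have h0 : m % 2 = 0 := Nat.even_iff.mp he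
      have h1 : (m + 1) % 2 = 1 := by omega
      simp [h0, h1]
    · have h0 : m % 2 = 1 := Nat.odd_iff.mp ho
      have h1 : (m + 1) % 2 = 0 := by omega
      simp [h0, h1]

-- the outer (y) loop: the whole fold equals B's double flatMap
lemma pv_outer_loop (d0 d1 p0 p1v xr : Int) (n : Nat) (acc : List (Int × Int)) :
    (PySem.List.pyRange 0 (n : Int) 1).foldl
      (fun (st : Int × List (Int × Int)) (i : Int) =>
        ((if i ≠ 0 then
            if PySem.Int.mod i 2 = 0 then st.1 + 2 * p1v
            else st.1 + 2 * (d1 - p1v)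
          else st.1),
         ((PySem.List.pyRange 0 xr 1).foldl
           (fun (st2 : Int × List (Int × Int)) (j : Int) =>
             if PySem.Int.mod j 2 = 0 then
               (st2.1 + 2 * (d0 - p0),
                st2.2 ++ [(st2.1, (if i ≠ 0 then
                                     if PySem.Int.mod i 2 = 0 then st.1 + 2 * p1v
                                     else st.1 + 2 * (d1 - p1v)
                                   else st.1)),
                          (st2.1, -(if i ≠ 0 then
                                     if PySem.Int.mod i 2 = 0 then st.1 + 2 * p1v
                                     else st.1 + 2 * (d1 - p1v)
                                   else st.1)),
                          (-st2.1, -(if i ≠ 0 then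
                                     if PySem.Int.mod i 2 = 0 then st.1 + 2 * p1v
                                     else st.1 + 2 * (d1 - p1v)
                                   else st.1)),
                          (-st2.1, (if i ≠ 0 then
                                     if PySem.Int.mod i 2 = 0 then st.1 + 2 * p1v
                                     else st.1 + 2 * (d1 - p1v)
                                   else st.1))])
             else
               (st2.1 + 2 * p0,
                st2.2 ++ [(st2.1, (if i ≠ 0 then
                                     if PySem.Int.mod i 2 = 0 then st.1 + 2 * p1v
                                     else st.1 + 2 * (d1 - p1v)
                                   else st.1)),
                          (st2.1, -(if i ≠ 0 then
                                     if PySem.Int.mod i 2 = 0 then st.1 + 2 * p1v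
                                     else st.1 + 2 * (d1 - p1v)
                                   else st.1)),
                          (-st2.1, -(if i ≠ 0 then
                                     if PySem.Int.mod i 2 = 0 then st.1 + 2 * p1v
                                     else st.1 + 2 * (d1 - p1v)
                                   else st.1)),
                          (-st2.1, (if i ≠ 0 then
                                     if PySem.Int.mod i 2 = 0 then st.1 + 2 * p1v
                                     else st.1 + 2 * (d1 - p1v)
                                   else st.1))]))
           (p0, st.2)).2))
      (p1v, acc)
    = (pvYprev d1 p1v n,
       acc ++ (PySem.List.pyRange 0 (n : Int) 1).flatMap (fun i =>
         (PySem.List.pyRange 0 xr 1).flatMap (fun j =>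
           [(pvCoord j d0 p0, pvCoord i d1 p1v), (pvCoord j d0 p0, -pvCoord i d1 p1v),
            (-pvCoord j d0 p0, -pvCoord i d1 p1v), (-pvCoord j d0 p0, pvCoord i d1 p1v)]))) := by
  induction n generalizing acc with
  | zero => simp [PySem.List.pyRange_one_eq_nil, pvYprev]
  | succ m ih =>
    have hcast : ((m + 1 : Nat) : Int) = (m : Int) + 1 := by push_cast; ring
    rw [hcast, PySem.List.pyRange_one_succ_right (by positivity), List.foldl_append,
      List.flatMap_append, ih]
    simp only [List.foldl_cons, List.foldl_nil]
    rw [pv_ytemp, pv_inner_loop_int]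
    have hprev : pvYprev d1 p1v (m + 1) = pvCoord (m : Int) d1 p1v := by
      simp [pvYprev]
    rw [hprev]
    simp [List.append_assoc]

-- the two ports, with every list access abstracted
lemma pv_main (d0 d1 p0 p1v xr yr : Int) :
    ((PySem.List.pyRange 0 yr 1).foldl
      (fun (st : Int × List (Int × Int)) (i : Int) =>
        ((if i ≠ 0 then
            if PySem.Int.mod i 2 = 0 then st.1 + 2 * p1v
            else st.1 + 2 * (d1 - p1v)
          else st.1),
         ((PySem.List.pyRange 0 xr 1).foldl
           (fun (st2 : Int × List (Int × Int)) (j : Int) =>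
             if PySem.Int.mod j 2 = 0 then
               (st2.1 + 2 * (d0 - p0),
                st2.2 ++ [(st2.1, (if i ≠ 0 then
                                     if PySem.Int.mod i 2 = 0 then st.1 + 2 * p1v
                                     else st.1 + 2 * (d1 - p1v)
                                   else st.1)),
                          (st2.1, -(if i ≠ 0 then
                                     if PySem.Int.mod i 2 = 0 then st.1 + 2 * p1v
                                     else st.1 + 2 * (d1 - p1v)
                                   else st.1)),
                          (-st2.1, -(if i ≠ 0 then
                                     if PySem.Int.mod i 2 = 0 then st.1 + 2 * p1v
                                     else st.1 + 2 * (d1 - p1v)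
                                   else st.1)),
                          (-st2.1, (if i ≠ 0 then
                                     if PySem.Int.mod i 2 = 0 then st.1 + 2 * p1v
                                     else st.1 + 2 * (d1 - p1v)
                                   else st.1))])
             else
               (st2.1 + 2 * p0,
                st2.2 ++ [(st2.1, (if i ≠ 0 then
                                     if PySem.Int.mod i 2 = 0 then st.1 + 2 * p1v
                                     else st.1 + 2 * (d1 - p1v)
                                   else st.1)),
                          (st2.1, -(if i ≠ 0 then
                                     if PySem.Int.mod i 2 = 0 then st.1 + 2 * p1v
                                     else st.1 + 2 * (d1 - p1v)
                                   else st.1)),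
                          (-st2.1, -(if i ≠ 0 then
                                     if PySem.Int.mod i 2 = 0 then st.1 + 2 * p1v
                                     else st.1 + 2 * (d1 - p1v)
                                   else st.1)),
                          (-st2.1, (if i ≠ 0 then
                                     if PySem.Int.mod i 2 = 0 then st.1 + 2 * p1v
                                     else st.1 + 2 * (d1 - p1v)
                                   else st.1))]))
           (p0, st.2)).2))
      (p1v, ([] : List (Int × Int)))).2
    = (PySem.List.pyRange 0 yr 1).flatMap (fun i =>
        (PySem.List.pyRange 0 xr 1).flatMap (fun j =>
          [(pvCoord j d0 p0, pvCoord i d1 p1v), (pvCoord j d0 p0, -pvCoord i d1 p1v),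
           (-pvCoord j d0 p0, -pvCoord i d1 p1v), (-pvCoord j d0 p0, pvCoord i d1 p1v)])) := by
  rcases le_or_gt yr 0 with hm | hm
  · simp [PySem.List.pyRange_one_eq_nil hm]
  · have h : yr = ((yr.toNat : Nat) : Int) := by omega
    rw [h, pv_outer_loop]
    simp

-- ===== VERDICT (by name: the statement is the Claim_ definition above) =====
theorem get_reflections_spec : Claim_equal_get_reflections := by
  intro dimensions position_1 position_2 distance _ _
  unfold Spec_get_reflections get_reflections get_reflections_alt
  exact pv_main (PySem.List.pyGetD dimensions 0 0) (PySem.List.pyGetD dimensions 1 0)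
    (PySem.List.pyGetD position_2 0 0) (PySem.List.pyGetD position_2 1 0)
    (PySem.Int.truncdiv (PySem.List.pyGetD position_1 0 0 + distance) (PySem.List.pyGetD dimensions 0 0) + 1)
    (PySem.Int.truncdiv (PySem.List.pyGetD position_1 1 0 + distance) (PySem.List.pyGetD dimensions 1 0) + 1)
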